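-- pv_equiv track=rewrite | github.com/dcsterpu/MEM_Configurator | MEM_configurator.py | check_ordered
-- ===== SOURCE A (Python) =====
-- def check_ordered(block_list):
--     total = 0
--     max = float('-inf')
--     min = float('+inf')
--     IDs = []
--
--     # extract IDs for each block into an array
--     for block in block_list:
--         for key, value in block.items():
--             if key == 'NvMNvramBlockIdentifier':
--                 IDs.append(value)
--                 break
--     # create a set for quick order
--     seen = set()
--     for elem in IDs:
--         if elem in seen:
--             return False
--         seen.add(elem)
--         if elem > max:
--             max = elem
--         if elem < min:
--             min = elem
--         total += elem
--     # sum of n consecutive numbers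
--     if 2*total != max*(max+1) - min*(min-1):
--         return False
--
--     return True
-- ===== SOURCE B (Python) =====
-- def check_ordered(block_list):
--     ids = sorted(block['NvMNvramBlockIdentifier'] for block in block_list
--                  if 'NvMNvramBlockIdentifier' in block)
--     if not ids:
--         return False
--     return all(b - a == 1 for a, b in zip(ids, ids[1:]))
-- ===== Notes on version B (the rewrite author's own statement) =====
-- stated objective: simpler
-- what changed: B replaces A's hash-set duplicate detection plus the closed-form sum identity 2*sum == max*(max+1) - min*(min-1) by sorting the extracted IDs and scanning adjacent pairs for difference exactly 1, which also fixes A's false acceptance of some non-consecutive sets with negative IDs.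
-- intended difference: On non-empty duplicate-free ID lists that are not consecutive but whose sum happens to satisfy A's formula 2*sum = max*(max+1) - min*(min-1) (possible only with negative IDs, e.g. IDs -3 and 3), A wrongly returns True; B returns False, the intended answer for a consecutive-unique-IDs check. — e.g. on check_ordered([[("NvMNvramBlockIdentifier", -2)], [("NvMNvramBlockIdentifier", 0)], [("NvMNvramBlockIdentifier", 2)]]): A returns true, B returns false
import Mathlib
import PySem

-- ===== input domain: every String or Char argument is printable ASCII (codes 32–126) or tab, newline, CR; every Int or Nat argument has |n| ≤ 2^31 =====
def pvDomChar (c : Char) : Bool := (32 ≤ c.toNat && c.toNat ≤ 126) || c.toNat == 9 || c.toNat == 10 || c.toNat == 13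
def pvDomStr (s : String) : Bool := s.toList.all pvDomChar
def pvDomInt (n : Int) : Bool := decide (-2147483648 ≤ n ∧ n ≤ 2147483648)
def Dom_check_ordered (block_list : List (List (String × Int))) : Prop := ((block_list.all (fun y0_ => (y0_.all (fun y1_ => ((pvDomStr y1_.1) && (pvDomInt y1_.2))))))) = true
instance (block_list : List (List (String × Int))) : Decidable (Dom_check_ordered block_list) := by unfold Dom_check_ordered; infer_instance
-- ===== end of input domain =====

-- B replaces A's set + sum-formula trick (which falsely accepts some non-consecutive sets
-- containing negative IDs) by sort + adjacent-difference scan; objective: a correct, simpler check.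

-- ===== PORT A =====
-- Literal port of A. float('-inf')/float('+inf') running max/min are modelled as Option Int
-- (none = still infinite, possible only when no IDs were seen); in that case Python's final
-- comparison `2*0 != inf - inf` is `0 != nan`, which is True, so A returns False: pvFin _ none _ = false.
def pvFindId : List (String × Int) → Option Int
  | [] => none
  | (k, v) :: rest => if k = "NvMNvramBlockIdentifier" then some v else pvFindId rest

def pvMaxStep (mx : Option Int) (e : Int) : Option Int :=
  match mx with
  | some M => if e > M then some e else some M
  | none => some e

def pvMinStep (mn : Option Int) (e : Int) : Option Int :=
  match mn with
  | some m => if e < m then some e else some m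
  | none => some e

def pvFin (mx mn : Option Int) (total : Int) : Bool :=
  match mx, mn with
  | some M, some m => if 2 * total ≠ M * (M + 1) - m * (m - 1) then false else true
  | _, _ => false

def pvLoopA : List Int → PySem.Set Int → Option Int → Option Int → Int → Bool
  | [], _, mx, mn, total => pvFin mx mn total
  | e :: rest, seen, mx, mn, total =>
    if PySem.Set.contains seen e then false
    else pvLoopA rest (PySem.Set.add seen e) (pvMaxStep mx e) (pvMinStep mn e) (total + e)

def check_ordered (block_list : List (List (String × Int))) : Bool :=
  let IDs := block_list.foldl (fun ids block =>
    match pvFindId block with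
    | some v => ids ++ [v]
    | none => ids) []
  pvLoopA IDs PySem.Set.empty none none 0

-- ===== PORT B =====
-- the extracted IDs: `block['NvMNvramBlockIdentifier'] for block in block_list if key in block`
def pvIds (block_list : List (List (String × Int))) : List Int :=
  block_list.filterMap (fun block => PySem.Dict.get? ⟨block⟩ "NvMNvramBlockIdentifier")

def check_ordered_alt (block_list : List (List (String × Int))) : Bool :=
  let ids := PySem.List.sorted (pvIds block_list) (fun x => x) false
  if ids.isEmpty then false
  else (ids.zip ids.tail).all (fun p => p.2 - p.1 == 1)

-- ===== PRECONDITION & SPEC =====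
-- On non-empty duplicate-free ID sets that are NOT consecutive but whose sum happens to satisfy
-- A's closed formula 2*sum = max*(max+1) - min*(min-1) (possible only with negative IDs, e.g.
-- IDs {-3, 3}), A wrongly returns True; B returns False, the intended answer for a
-- "consecutive unique IDs" check.
-- the IDs the input carries, read off with A's own key-lookup helper pvFindId
def pvIdsD (block_list : List (List (String × Int))) : List Int :=
  block_list.filterMap pvFindId

def D_check_ordered (block_list : List (List (String × Int))) : Prop :=
  pvIdsD block_list ≠ [] ∧ (pvIdsD block_list).Nodup ∧
  ∃ m ∈ pvIdsD block_list, ∃ M ∈ pvIdsD block_list,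
    (∀ x ∈ pvIdsD block_list, m ≤ x ∧ x ≤ M) ∧
    2 * (pvIdsD block_list).sum = M * (M + 1) - m * (m - 1) ∧
    ((pvIdsD block_list).length : Int) ≠ M - m + 1

instance (block_list : List (List (String × Int))) : Decidable (D_check_ordered block_list) := by
  unfold D_check_ordered; infer_instance

def Spec_check_ordered (block_list : List (List (String × Int))) (out : Bool) : Prop :=
  ¬ D_check_ordered block_list → out = check_ordered_alt block_list
instance (block_list : List (List (String × Int))) (out : Bool) : Decidable (Spec_check_ordered block_list out) := by
  unfold Spec_check_ordered; infer_instance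

def pvDiffWitness_check_ordered : (List (List (String × Int))) :=
  [[("NvMNvramBlockIdentifier", -2)], [("NvMNvramBlockIdentifier", 0)], [("NvMNvramBlockIdentifier", 2)]]

def pvDiffWitnessOut_check_ordered : Bool × Bool := (true, false)

-- ===== CLAIM (what is proved, stated in full; the proofs are below) =====
def Claim_unchanged_check_ordered : Prop := ∀ (block_list : List (List (String × Int))), Dom_check_ordered block_list → Spec_check_ordered block_list (check_ordered block_list)
def Claim_changed_check_ordered : Prop := Dom_check_ordered (pvDiffWitness_check_ordered) ∧ D_check_ordered (pvDiffWitness_check_ordered) ∧ check_ordered (pvDiffWitness_check_ordered) = pvDiffWitnessOut_check_ordered.1 ∧ check_ordered_alt (pvDiffWitness_check_ordered) = pvDiffWitnessOut_check_ordered.2 ∧ pvDiffWitnessOut_check_ordered.1 ≠ pvDiffWitnessOut_check_ordered.2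
def Claim_exact_check_ordered : Prop := ∀ (block_list : List (List (String × Int))), Dom_check_ordered block_list → D_check_ordered block_list → check_ordered block_list ≠ check_ordered_alt block_list

-- ===== LEMMAS AND PROOFS =====

-- the step relation of B's adjacent-difference scan
def pvStep (a b : Int) : Prop := b = a + 1

theorem findId_eq (block : List (String × Int)) :
    pvFindId block = PySem.Dict.get? ⟨block⟩ "NvMNvramBlockIdentifier" := by
  induction block with
  | nil => rfl
  | cons p rest ih =>
    obtain ⟨k, v⟩ := p
    rw [pvFindId, PySem.Dict.get?_mk_cons, ih]
    simp [beq_iff_eq]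

theorem extract_eq (block_list : List (List (String × Int))) :
    block_list.foldl (fun ids block =>
      match pvFindId block with
      | some v => ids ++ [v]
      | none => ids) [] = pvIds block_list := by
  suffices h : ∀ acc, block_list.foldl (fun ids block =>
      match pvFindId block with
      | some v => ids ++ [v]
      | none => ids) acc = acc ++ pvIds block_list from h []
  induction block_list with
  | nil => intro acc; simp [pvIds]
  | cons b rest ih =>
    intro acc
    simp only [List.foldl_cons, pvIds, List.filterMap_cons, findId_eq b]
    cases h : PySem.Dict.get? (⟨b⟩ : PySem.Dict String Int) "NvMNvramBlockIdentifier" with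
    | none => simpa [h] using ih acc
    | some v => simp [ih (acc ++ [v]), pvIds]

theorem pvIdsD_eq (block_list : List (List (String × Int))) :
    pvIdsD block_list = pvIds block_list := by
  unfold pvIdsD pvIds
  induction block_list with
  | nil => rfl
  | cons b rest ih => simp only [List.filterMap_cons, findId_eq b, ih]

theorem loopA_eq (ids : List Int) : ∀ (seen : PySem.Set Int) (mx mn : Option Int) (t : Int),
    seen.Nodup →
    pvLoopA ids seen mx mn t =
      if (seen ++ ids).Nodup then
        pvFin (ids.foldl pvMaxStep mx) (ids.foldl pvMinStep mn) (t + ids.sum)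
      else false := by
  induction ids with
  | nil => intro seen mx mn t hs; simp [pvLoopA, hs]
  | cons e rest ih =>
    intro seen mx mn t hs
    by_cases he : e ∈ seen
    · have hc : PySem.Set.contains seen e = true := by simp [pysem, he]
      have hnd : ¬ (seen ++ e :: rest).Nodup := by
        intro hnd
        exact List.disjoint_of_nodup_append hnd he List.mem_cons_self
      rw [pvLoopA, if_pos hc, if_neg hnd]
    · have hadd : PySem.Set.add seen e = seen ++ [e] := by
        rw [PySem.Set.add, if_neg (by simp [pysem, he])]
      have hs' : (seen ++ [e]).Nodup := by
        rw [List.nodup_append]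
        refine ⟨hs, List.nodup_singleton e, ?_⟩
        intro a ha b hb
        have hbe : b = e := by simpa using hb
        subst hbe
        exact fun hab => he (hab ▸ ha)
      rw [pvLoopA, if_neg (by simp [pysem, he]), hadd, ih _ _ _ _ hs']
      have harr : seen ++ [e] ++ rest = seen ++ e :: rest := by simp
      rw [harr]
      have hsum : t + e + rest.sum = t + (e :: rest).sum := by simp [List.sum_cons]; ring
      simp [hsum]

theorem foldl_max_spec : ∀ (ids : List Int) (c : Int),
    ids.foldl pvMaxStep (some c) = some (ids.foldl max c) ∧
    ids.foldl max c ∈ c :: ids ∧ ∀ x ∈ c :: ids, x ≤ ids.foldl max c := by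
  intro ids
  induction ids with
  | nil => intro c; exact ⟨rfl, by simp, by simp⟩
  | cons e rest ih =>
    intro c
    have hstep : pvMaxStep (some c) e = some (max c e) := by
      simp only [pvMaxStep]; split <;> simp <;> omega
    obtain ⟨h1, h2, h3⟩ := ih (max c e)
    refine ⟨by simpa [hstep] using h1, ?_, ?_⟩
    · rw [List.foldl_cons]
      rcases List.mem_cons.mp h2 with h | h
      · rw [h]
        rcases max_choice c e with hm | hm <;> simp [hm]
      · simp [h]
    · intro x hx
      rw [List.foldl_cons]
      rcases List.mem_cons.mp hx with rfl | hx
      · exact le_trans (le_max_left x e) (h3 _ List.mem_cons_self)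
      · rcases List.mem_cons.mp hx with rfl | hx
        · exact le_trans (le_max_right c x) (h3 _ List.mem_cons_self)
        · exact h3 _ (List.mem_cons_of_mem _ hx)

theorem foldl_min_spec : ∀ (ids : List Int) (c : Int),
    ids.foldl pvMinStep (some c) = some (ids.foldl min c) ∧
    ids.foldl min c ∈ c :: ids ∧ ∀ x ∈ c :: ids, ids.foldl min c ≤ x := by
  intro ids
  induction ids with
  | nil => intro c; exact ⟨rfl, by simp, by simp⟩
  | cons e rest ih =>
    intro c
    have hstep : pvMinStep (some c) e = some (min c e) := by
      simp only [pvMinStep]; split <;> simp <;> omega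
    obtain ⟨h1, h2, h3⟩ := ih (min c e)
    refine ⟨by simpa [hstep] using h1, ?_, ?_⟩
    · rw [List.foldl_cons]
      rcases List.mem_cons.mp h2 with h | h
      · rw [h]
        rcases min_choice c e with hm | hm <;> simp [hm]
      · simp [h]
    · intro x hx
      rw [List.foldl_cons]
      rcases List.mem_cons.mp hx with rfl | hx
      · exact le_trans (h3 _ List.mem_cons_self) (min_le_left x e)
      · rcases List.mem_cons.mp hx with rfl | hx
        · exact le_trans (h3 _ List.mem_cons_self) (min_le_right c x)
        · exact h3 _ (List.mem_cons_of_mem _ hx)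

theorem foldl_maxStep_none (ids : List Int) (h : ids ≠ []) :
    ∃ M, ids.foldl pvMaxStep none = some M ∧ M ∈ ids ∧ ∀ x ∈ ids, x ≤ M := by
  obtain ⟨e, rest, rfl⟩ := List.exists_cons_of_ne_nil h
  obtain ⟨h1, h2, h3⟩ := foldl_max_spec rest e
  exact ⟨rest.foldl max e, by simpa [pvMaxStep] using h1, h2, h3⟩

theorem foldl_minStep_none (ids : List Int) (h : ids ≠ []) :
    ∃ m, ids.foldl pvMinStep none = some m ∧ m ∈ ids ∧ ∀ x ∈ ids, m ≤ x := by
  obtain ⟨e, rest, rfl⟩ := List.exists_cons_of_ne_nil h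
  obtain ⟨h1, h2, h3⟩ := foldl_min_spec rest e
  exact ⟨rest.foldl min e, by simpa [pvMinStep] using h1, h2, h3⟩

theorem zip_all_iff (s : List Int) :
    (((s.zip s.tail).all fun p => p.2 - p.1 == 1) = true) ↔ List.IsChain pvStep s := by
  induction s with
  | nil => simp
  | cons a t ih =>
    cases t with
    | nil => simp
    | cons b r =>
      simp only [List.tail_cons, List.zip_cons_cons, List.all_cons, Bool.and_eq_true,
        List.isChain_cons_cons, ← ih, List.tail_cons]
      constructor
      · rintro ⟨h1, h2⟩
        refine ⟨?_, h2⟩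
        have : b - a = 1 := by simpa using h1
        unfold pvStep; omega
      · rintro ⟨h1, h2⟩
        refine ⟨?_, h2⟩
        unfold pvStep at h1
        simp; omega

theorem chain_sum : ∀ (t : List Int) (a : Int), List.IsChain pvStep (a :: t) →
    2 * (a :: t).sum = ((a :: t).getLast (by simp)) * ((a :: t).getLast (by simp) + 1) - a * (a - 1) := by
  intro t
  induction t with
  | nil => intro a _; simp [List.getLast]; ring
  | cons b r ih =>
    intro a h
    rcases List.isChain_cons_cons.mp h with ⟨hab, h2⟩
    have hL : (a :: b :: r).getLast (by simp) = (b :: r).getLast (by simp) :=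
      List.getLast_cons (by simp)
    have := ih b h2
    unfold pvStep at hab
    rw [hL]
    simp only [List.sum_cons] at this ⊢
    subst hab
    linear_combination this

theorem chain_span : ∀ (t : List Int) (a : Int), List.IsChain pvStep (a :: t) →
    (a :: t).getLast (by simp) = a + t.length := by
  intro t
  induction t with
  | nil => intro a _; simp [List.getLast]
  | cons b r ih =>
    intro a h
    rcases List.isChain_cons_cons.mp h with ⟨hab, h2⟩
    have hL : (a :: b :: r).getLast (by simp) = (b :: r).getLast (by simp) :=
      List.getLast_cons (by simp)
    unfold pvStep at hab
    rw [hL, ih b h2]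
    simp; omega

theorem span_ge : ∀ (t : List Int) (a : Int), List.IsChain (· < ·) (a :: t) →
    a + t.length ≤ (a :: t).getLast (by simp) := by
  intro t
  induction t with
  | nil => intro a _; simp [List.getLast]
  | cons b r ih =>
    intro a h
    rcases List.isChain_cons_cons.mp h with ⟨hab, h2⟩
    have hL : (a :: b :: r).getLast (by simp) = (b :: r).getLast (by simp) :=
      List.getLast_cons (by simp)
    have := ih b h2
    rw [hL]
    simp at this ⊢
    omega

theorem chain_of_span : ∀ (t : List Int) (a : Int), List.IsChain (· < ·) (a :: t) →
    (a :: t).getLast (by simp) = a + t.length → List.IsChain pvStep (a :: t) := by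
  intro t
  induction t with
  | nil => intro a _ _; simp
  | cons b r ih =>
    intro a h hspan
    rcases List.isChain_cons_cons.mp h with ⟨hab, h2⟩
    have hL : (a :: b :: r).getLast (by simp) = (b :: r).getLast (by simp) :=
      List.getLast_cons (by simp)
    rw [hL] at hspan
    have hge := span_ge r b h2
    have hb : b = a + 1 := by
      simp at hspan hge ⊢
      omega
    refine List.isChain_cons_cons.mpr ⟨hb, ih b h2 ?_⟩
    rw [hspan]
    simp; omega

theorem le_getLast_of_pairwise : ∀ (t : List Int) (a x : Int),
    (a :: t).Pairwise (· ≤ ·) → x ∈ a :: t → x ≤ (a :: t).getLast (by simp) := by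
  intro t
  induction t with
  | nil => intro a x _ hx; simp at hx; simp [List.getLast, hx]
  | cons b r ih =>
    intro a x hp hx
    have hL : (a :: b :: r).getLast (by simp) = (b :: r).getLast (by simp) :=
      List.getLast_cons (by simp)
    rw [hL]
    rcases List.mem_cons.mp hx with rfl | hx
    · have hxb : x ≤ b := List.rel_of_pairwise_cons hp List.mem_cons_self
      exact le_trans hxb (ih b b hp.tail List.mem_cons_self)
    · exact ih b x hp.tail hx

theorem check_ordered_eval (bl : List (List (String × Int))) :
    check_ordered bl =
      if (pvIds bl).Nodup then
        pvFin ((pvIds bl).foldl pvMaxStep none) ((pvIds bl).foldl pvMinStep none) (0 + (pvIds bl).sum)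
      else false := by
  unfold check_ordered
  rw [extract_eq]
  rw [loopA_eq (pvIds bl) PySem.Set.empty none none 0 (by simp [PySem.Set.empty])]
  simp [PySem.Set.empty]

theorem core_eq (ids : List Int)
    (hD : ¬ (ids ≠ [] ∧ ids.Nodup ∧ ∃ m ∈ ids, ∃ M ∈ ids,
      (∀ x ∈ ids, m ≤ x ∧ x ≤ M) ∧ 2 * ids.sum = M * (M + 1) - m * (m - 1) ∧
      ((ids.length : Int) ≠ M - m + 1))) :
    (if ids.Nodup then
        pvFin (ids.foldl pvMaxStep none) (ids.foldl pvMinStep none) (0 + ids.sum)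
      else false)
    = (if (PySem.List.sorted ids (fun x => x) false).isEmpty then false
       else ((PySem.List.sorted ids (fun x => x) false).zip
             (PySem.List.sorted ids (fun x => x) false).tail).all fun p => p.2 - p.1 == 1) := by
  have hperm := PySem.List.sorted_perm ids (fun x : Int => x) false
  have hpw : (PySem.List.sorted ids (fun x : Int => x) false).Pairwise (· ≤ ·) := by
    simpa using PySem.List.sorted_pairwise ids (fun x => x)
  have hnil_iff := PySem.List.sorted_eq_nil_iff ids (fun x : Int => x) false
  generalize hgen : PySem.List.sorted ids (fun x : Int => x) false = s at hperm hpw hnil_iff ⊢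
  by_cases hnil : ids = []
  · subst hnil
    have hse : s = [] := hnil_iff.mpr rfl
    subst hse
    decide
  · have hsnil : s ≠ [] := fun h => hnil (hnil_iff.mp h)
    obtain ⟨a, t, rfl⟩ := List.exists_cons_of_ne_nil hsnil
    rw [if_neg (by simp : ¬ ((a :: t).isEmpty = true))]
    by_cases hnd : ids.Nodup
    · obtain ⟨M, hMeq, hMmem, hMub⟩ := foldl_maxStep_none ids hnil
      obtain ⟨m, hmeq, hmmem, hmlb⟩ := foldl_minStep_none ids hnil
      rw [if_pos hnd, hMeq, hmeq]
      have hnds : (a :: t).Nodup := (hperm.nodup_iff).mpr hnd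
      have hplt : (a :: t).Pairwise (· < ·) :=
        (hpw.and hnds).imp (fun hab => lt_of_le_of_ne hab.1 hab.2)
      have hchainlt : List.IsChain (· < ·) (a :: t) := hplt.isChain
      have hamem : a ∈ ids := hperm.mem_iff.mp List.mem_cons_self
      have hms : m ∈ a :: t := hperm.mem_iff.mpr hmmem
      have hMs : M ∈ a :: t := hperm.mem_iff.mpr hMmem
      have haLe : ∀ x ∈ a :: t, a ≤ x := by
        intro x hx
        rcases List.mem_cons.mp hx with rfl | hx
        · exact le_refl x
        · exact List.rel_of_pairwise_cons hpw hx
      have ham : a = m := le_antisymm (haLe m hms) (hmlb a hamem)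
      have hglmem : (a :: t).getLast (by simp) ∈ ids :=
        hperm.mem_iff.mp (List.getLast_mem _)
      have hglM : (a :: t).getLast (by simp) = M :=
        le_antisymm (hMub _ hglmem) (le_getLast_of_pairwise t a M hpw hMs)
      have hlens : (a :: t).length = ids.length := hperm.length_eq
      by_cases hf : 2 * ids.sum = M * (M + 1) - m * (m - 1)
      · have hA : pvFin (some M) (some m) (0 + ids.sum) = true := by
          simp [pvFin, hf]
        rw [hA]
        have hlen : (ids.length : Int) = M - m + 1 := by
          by_contra hne
          exact hD ⟨hnil, hnd, m, hmmem, M, hMmem,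
            fun x hx => ⟨hmlb x hx, hMub x hx⟩, hf, hne⟩
        have htlen : (t.length : Int) = M - m := by
          have h1 : t.length + 1 = ids.length := by simpa using hlens
          omega
        have hspan : (a :: t).getLast (by simp) = a + t.length := by
          rw [hglM]; omega
        symm
        exact (zip_all_iff (a :: t)).mpr (chain_of_span t a hchainlt hspan)
      · have hA : pvFin (some M) (some m) (0 + ids.sum) = false := by
          simp [pvFin, hf]
        rw [hA]
        cases hall : ((a :: t).zip (a :: t).tail).all fun p => p.2 - p.1 == 1 with
        | false => rfl
        | true =>
          exfalso
          have hchain := (zip_all_iff (a :: t)).mp hall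
          have hsum := chain_sum t a hchain
          rw [hglM, hperm.sum_eq] at hsum
          rw [ham] at hsum
          exact hf hsum
    · rw [if_neg hnd]
      cases hall : ((a :: t).zip (a :: t).tail).all fun p => p.2 - p.1 == 1 with
      | false => rfl
      | true =>
        exfalso
        have hchain := (zip_all_iff (a :: t)).mp hall
        have hchlt : List.IsChain (· < ·) (a :: t) :=
          hchain.imp (by intro x y hxy; unfold pvStep at hxy; omega)
        exact hnd (hperm.nodup_iff.mp hchlt.pairwise.nodup)

theorem alt_false_of_not_interval (ids : List Int) (hnil : ids ≠ []) (m M : Int)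
    (hmmem : m ∈ ids) (hMmem : M ∈ ids) (hbounds : ∀ x ∈ ids, m ≤ x ∧ x ≤ M)
    (hlen : (ids.length : Int) ≠ M - m + 1) :
    (if (PySem.List.sorted ids (fun x => x) false).isEmpty then false
       else ((PySem.List.sorted ids (fun x => x) false).zip
             (PySem.List.sorted ids (fun x => x) false).tail).all fun p => p.2 - p.1 == 1) = false := by
  have hperm := PySem.List.sorted_perm ids (fun x : Int => x) false
  have hpw : (PySem.List.sorted ids (fun x : Int => x) false).Pairwise (· ≤ ·) := by
    simpa using PySem.List.sorted_pairwise ids (fun x => x)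
  have hnil_iff := PySem.List.sorted_eq_nil_iff ids (fun x : Int => x) false
  generalize hgen : PySem.List.sorted ids (fun x : Int => x) false = s at hperm hpw hnil_iff ⊢
  have hsnil : s ≠ [] := fun h => hnil (hnil_iff.mp h)
  obtain ⟨a, t, rfl⟩ := List.exists_cons_of_ne_nil hsnil
  rw [if_neg (by simp : ¬ ((a :: t).isEmpty = true))]
  cases hall : ((a :: t).zip (a :: t).tail).all fun p => p.2 - p.1 == 1 with
  | false => rfl
  | true =>
    exfalso
    have hchain := (zip_all_iff (a :: t)).mp hall
    have hspan := chain_span t a hchain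
    have hamem : a ∈ ids := hperm.mem_iff.mp List.mem_cons_self
    have hms : m ∈ a :: t := hperm.mem_iff.mpr hmmem
    have hMs : M ∈ a :: t := hperm.mem_iff.mpr hMmem
    have haLe : ∀ x ∈ a :: t, a ≤ x := by
      intro x hx
      rcases List.mem_cons.mp hx with rfl | hx
      · exact le_refl x
      · exact List.rel_of_pairwise_cons hpw hx
    have ham : a = m := le_antisymm (haLe m hms) ((hbounds a hamem).1)
    have hglmem : (a :: t).getLast (by simp) ∈ ids :=
      hperm.mem_iff.mp (List.getLast_mem _)
    have hglM : (a :: t).getLast (by simp) = M :=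
      le_antisymm ((hbounds _ hglmem).2) (le_getLast_of_pairwise t a M hpw hMs)
    have hlens : t.length + 1 = ids.length := by simpa using hperm.length_eq
    rw [hglM] at hspan
    apply hlen
    omega

-- ===== VERDICT (by name: the statement is the Claim_ definition above) =====
theorem check_ordered_spec : Claim_unchanged_check_ordered := by
  intro bl _hDom
  unfold Spec_check_ordered
  intro hD
  rw [check_ordered_eval]
  unfold check_ordered_alt
  unfold D_check_ordered at hD
  rw [pvIdsD_eq] at hD
  exact core_eq (pvIds bl) hD

theorem check_ordered_changed : Claim_changed_check_ordered := by
  unfold Claim_changed_check_ordered; decide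

theorem check_ordered_tight : Claim_exact_check_ordered := by
  intro bl _hDom hD
  unfold D_check_ordered at hD
  rw [pvIdsD_eq] at hD
  obtain ⟨hnil, hnd, m, hmmem, M, hMmem, hbounds, hf, hlen⟩ := hD
  rw [check_ordered_eval]
  obtain ⟨M', hMeq, hMmem', hMub⟩ := foldl_maxStep_none _ hnil
  obtain ⟨m', hmeq, hmmem', hmlb⟩ := foldl_minStep_none _ hnil
  have hMM : M' = M := le_antisymm ((hbounds M' hMmem').2) (hMub M hMmem)
  have hmm : m' = m := le_antisymm (hmlb m hmmem) ((hbounds m' hmmem').1)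
  rw [if_pos hnd, hMeq, hmeq, hMM, hmm]
  have hA : pvFin (some M) (some m) (0 + (pvIds bl).sum) = true := by
    simp [pvFin, hf]
  rw [hA]
  unfold check_ordered_alt
  rw [alt_false_of_not_interval (pvIds bl) hnil m M hmmem hMmem hbounds hlen]
  decide
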